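-- pv_equiv track=rewrite | github.com/seanturner026/chef-planner | cooking.py | concurrency
-- ===== SOURCE A (Python) =====
-- def concurrency(instructions, epochs_d):
--     """Read output generated by organise_steps function and handle points in time which require
--     more than one action
--     """
--     # instantiate dictionary to hold all step details in order
--     instructions_ordered = {}
--     # iterate through ordered points in time
--     for key in epochs_d.keys():
--         if epochs_d[key] > 1:
--
--             orders = {}
--             # iterate over instructions holding all step details
--             for instruction in instructions:
--                 # flow control to select steps in order
--                 if key == instruction[2]:
--                     orders.update({
--                         instruction[3] : [instruction[1], instruction[2], instruction[0]]
--                         })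
--             instructions_ordered.update({key:orders})
--             continue
--
--         for instruction in instructions:
--             # flow control to select steps in order
--             if key == instruction[2]:
--                 # # write step lists to instructions_ordered in order of time
--                 instructions_ordered.update({key : {instruction[3] : [instruction[1],
--                                                                       instruction[2],
--                                                                       instruction[0]
--                                                                      ]}})
--     return instructions_ordered
-- ===== SOURCE B (Python) =====
-- def concurrency(instructions, epochs_d):
--     """Read output generated by organise_steps function and handle points in time which require
--     more than one action
--     """
--     # one pass: bucket the well-formed instructions by their time key
--     groups = {}
--     for ins in instructions:
--         if len(ins) > 2:
--             groups.setdefault(ins[2], []).append(ins)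
--     # one pass over the ordered time points, combining with the epoch counts
--     result = {}
--     for key, count in epochs_d.items():
--         matches = groups.get(key, [])
--         if count > 1:
--             result[key] = {m[3]: [m[1], m[2], m[0]] for m in matches}
--         elif matches:
--             m = matches[-1]
--             result[key] = {m[3]: [m[1], m[2], m[0]]}
--     return result
-- ===== Notes on version B (the rewrite author's own statement) =====
-- stated objective: faster
-- what changed: B buckets the instructions by their time key in one pass (dict of lists, skipping entries shorter than 3 fields) and then walks the epoch counts once combining with the buckets, instead of A's rescan of the whole instruction list for every time key.
import Mathlib
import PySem

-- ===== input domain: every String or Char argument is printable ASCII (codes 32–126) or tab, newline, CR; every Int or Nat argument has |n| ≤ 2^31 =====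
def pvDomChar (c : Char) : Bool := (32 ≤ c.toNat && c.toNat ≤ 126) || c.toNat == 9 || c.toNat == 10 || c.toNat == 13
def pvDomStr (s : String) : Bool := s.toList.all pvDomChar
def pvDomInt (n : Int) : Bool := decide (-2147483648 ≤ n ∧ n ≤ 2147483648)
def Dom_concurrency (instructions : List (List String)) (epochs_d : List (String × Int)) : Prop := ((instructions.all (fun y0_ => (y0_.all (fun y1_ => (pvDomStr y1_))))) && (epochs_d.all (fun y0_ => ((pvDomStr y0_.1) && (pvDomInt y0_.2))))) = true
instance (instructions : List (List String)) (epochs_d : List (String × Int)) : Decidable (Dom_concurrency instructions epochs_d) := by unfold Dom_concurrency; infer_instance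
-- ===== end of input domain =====

-- B buckets the instructions by time key in one pass and then combines with the epoch counts,
-- avoiding A's rescan of the whole instruction list for every time key.


-- ===== PORT A =====
-- [instruction[1], instruction[2], instruction[0]] — the value both Pythons store for a step
def pvRow (ins : List String) : List String :=
  [PySem.List.pyGetD ins 1 "", PySem.List.pyGetD ins 2 "", PySem.List.pyGetD ins 0 ""]

def concurrency (instructions : List (List String)) (epochs_d : List (String × Int)) : List (String × List (String × List String)) :=
  (epochs_d.foldl (fun (acc : PySem.Dict String (List (String × List String))) kv =>
    if (PySem.Dict.mk epochs_d).getD kv.1 0 > 1 then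
      let orders : PySem.Dict String (List String) :=
        instructions.foldl (fun od ins =>
          if kv.1 == PySem.List.pyGetD ins 2 "" then
            od.insert (PySem.List.pyGetD ins 3 "") (pvRow ins)
          else od) PySem.Dict.empty
      acc.insert kv.1 orders.items
    else
      instructions.foldl (fun acc2 ins =>
        if kv.1 == PySem.List.pyGetD ins 2 "" then
          acc2.insert kv.1 [(PySem.List.pyGetD ins 3 "", pvRow ins)]
        else acc2) acc) PySem.Dict.empty).items

-- ===== PORT B =====
-- if len(ins) > 2: groups.setdefault(ins[2], []).append(ins)
def pvGroups (instructions : List (List String)) : PySem.Dict String (List (List String)) :=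
  instructions.foldl (fun g ins =>
    if 2 < ins.length then
      g.modify (PySem.List.pyGetD ins 2 "") [] (fun x => x ++ [ins])
    else g) PySem.Dict.empty

def concurrency_alt (instructions : List (List String)) (epochs_d : List (String × Int)) : List (String × List (String × List String)) :=
  let groups := pvGroups instructions
  (epochs_d.foldl (fun (acc : PySem.Dict String (List (String × List String))) kv =>
    let matchs := groups.getD kv.1 []
    if kv.2 > 1 then
      acc.insert kv.1 ((matchs.foldl (fun od m =>
        od.insert (PySem.List.pyGetD m 3 "") (pvRow m)) PySem.Dict.empty).items)
    else if !matchs.isEmpty then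
      let m := PySem.List.pyGetD matchs (-1) []
      acc.insert kv.1 [(PySem.List.pyGetD m 3 "", pvRow m)]
    else acc) PySem.Dict.empty).items

-- ===== PRECONDITION & SPEC =====
-- epochs_d is a Python dict, so its keys are distinct; whenever epochs_d is non-empty A reads
-- instruction[2] of every instruction (so it needs 3 fields, else A raises IndexError), and it reads
-- instruction[3] of every instruction whose time key occurs in epochs_d (so those need 4 fields, else
-- A raises IndexError).  Pre_ admits exactly the inputs where A returns without an exception.
def Pre_concurrency (instructions : List (List String)) (epochs_d : List (String × Int)) : Prop :=
  (epochs_d.map Prod.fst).Nodup ∧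
  ∀ ins ∈ instructions, (epochs_d ≠ [] → 3 ≤ ins.length) ∧
    (4 ≤ ins.length ∨ ∀ p ∈ epochs_d, p.1 ≠ PySem.List.pyGetD ins 2 "")
instance (instructions : List (List String)) (epochs_d : List (String × Int)) : Decidable (Pre_concurrency instructions epochs_d) := by unfold Pre_concurrency; infer_instance

def pvWitness_concurrency : List (List String) × (List (String × Int)) :=
  ([["boil water", "10", "t1", "step 1"], ["chop", "5", "t1", "step 2"]], [("t1", 2), ("t2", 1)])

def Spec_concurrency (instructions : List (List String)) (epochs_d : List (String × Int)) (out : List (String × List (String × List String))) : Prop := out = concurrency_alt instructions epochs_d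
instance (instructions : List (List String)) (epochs_d : List (String × Int)) (out : List (String × List (String × List String))) : Decidable (Spec_concurrency instructions epochs_d out) := by unfold Spec_concurrency; infer_instance

-- ===== CLAIM (what is proved, stated in full; the proofs are below) =====
def Claim_equal_concurrency : Prop := ∀ (instructions : List (List String)) (epochs_d : List (String × Int)), Dom_concurrency instructions epochs_d → Pre_concurrency instructions epochs_d → Spec_concurrency instructions epochs_d (concurrency instructions epochs_d)

-- ===== LEMMAS AND PROOFS =====

-- the bucket for key k holds exactly the instructions whose field 2 is k, in order,
-- given that all instructions have at least 3 fields
lemma pvGroups_getD (instructions : List (List String)) (k : String)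
    (h : ∀ ins ∈ instructions, 3 ≤ ins.length) :
    (pvGroups instructions).getD k [] =
      instructions.filter (fun ins => PySem.List.pyGetD ins 2 "" == k) := by
  have hfun : pvGroups instructions =
      instructions.foldl (fun g ins =>
        g.modify (PySem.List.pyGetD ins 2 "") [] (fun x => x ++ [ins])) PySem.Dict.empty := by
    unfold pvGroups
    refine PySem.List.foldl_congr_mem _ _ _ _ ?_
    intro acc ins hins
    have := h ins hins
    simp [show 2 < ins.length by omega]
  rw [hfun]
  have h2 := PySem.Dict.getD_foldl_modify_append
      (instructions.map (fun ins => (PySem.List.pyGetD ins 2 "", ins)))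
      (PySem.Dict.empty (κ := String) (ν := List (List String))) k
  rw [List.foldl_map] at h2
  simpa [List.filter_map, List.map_map, Function.comp_def] using h2

-- a fold that keeps overwriting the same key ends up storing the value of the last element
lemma foldl_insert_same_key {α ν : Type} (l : List α) (k : String) (f : α → ν)
    (d : PySem.Dict String ν) :
    l.foldl (fun a m => a.insert k (f m)) d =
      match l.getLast? with
      | none => d
      | some m => d.insert k (f m) := by
  induction l generalizing d with
  | nil => rfl
  | cons a l ih =>
    cases l with
    | nil => rfl
    | cons b l' =>
      rw [List.foldl_cons, ih, List.getLast?_cons_cons]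
      cases hb : (b :: l').getLast? with
      | none => simp at hb
      | some m => simp [PySem.Dict.insert_insert_self]

lemma pyGetD_neg_one {α : Type} (l : List α) (d : α) (h : l ≠ []) :
    PySem.List.pyGetD l (-1) d = (l.getLast?).getD d := by
  have hl : 1 ≤ l.length := List.length_pos_iff.mpr h
  simp [PySem.List.pyGetD, PySem.List.pyGet?, PySem.List.pyIdx?, hl, List.getLast?_eq_getElem?]

theorem concurrency_spec : Claim_equal_concurrency := by
  intro instructions epochs_d _ hpre
  obtain ⟨hnd, hins⟩ := hpre
  unfold Spec_concurrency
  unfold concurrency concurrency_alt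
  refine congrArg PySem.Dict.items ?_
  refine PySem.List.foldl_congr_mem _ _ _ _ ?_
  intro acc kv hkv
  have hne : epochs_d ≠ [] := List.ne_nil_of_mem hkv
  have hlen : ∀ ins ∈ instructions, 3 ≤ ins.length := fun ins h => (hins ins h).1 hne
  have hval : (PySem.Dict.mk epochs_d).getD kv.1 0 = kv.2 := by
    refine PySem.Dict.getD_of_mem_items _ ?_ ?_ 0
    · simpa [PySem.Dict.items] using hkv
    · simpa [PySem.Dict.keys, PySem.Dict.items] using hnd
  rw [hval]
  simp only [pvGroups_getD instructions kv.1 hlen]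
  simp only [Bool.beq_comm (a := kv.1)]
  rw [← List.foldl_filter, ← List.foldl_filter]
  by_cases hgt : kv.2 > 1
  · simp [hgt, pvRow]
  · simp only [hgt, if_false]
    rw [foldl_insert_same_key]
    cases hF : instructions.filter (fun ins => PySem.List.pyGetD ins 2 "" == kv.1) with
    | nil => simp
    | cons b l' =>
      have hne2 : (b :: l') ≠ ([] : List (List String)) := by simp
      have hlast : (b :: l').getLast? = some ((b :: l').getLast hne2) := List.getLast?_eq_some_getLast hne2
      simp [hlast, pyGetD_neg_one _ _ hne2, pvRow]
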